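-- pv_equiv track=rewrite | github.com/cfevrius/PythonicCodingBat | source/string2.py | word_ends
-- ===== SOURCE A (Python) =====
-- def word_ends(string, word):
--     """
--     Given a string and a non-empty word string, return a string made of each char just before and just after every appearance of the
--     word in the string. Ignore cases where there is no char before or after the word, and a char may be included twice if it is between
--     two words.
--     """
--     word_len = len(word)
--     def get_char_at_index(i):
--         return string[i] if 0 <= i <= len(string) - 1 else ''
--
--     chars_before_and_after_match = [f'{get_char_at_index(i - 1)}{get_char_at_index(i + word_len)}'
--                                     for i, v in enumerate(string)
--                                     if string[i : i + word_len] == word]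
--     return ''.join(chars_before_and_after_match)
-- ===== SOURCE B (Python) =====
-- def word_ends(string, word):
--     # Locate occurrences with repeated str.find (O(n) scans in C) instead of
--     # slicing/comparing at every index; collect the neighbor chars of each match.
--     out = []
--     n, m = len(string), len(word)
--     pos = string.find(word)
--     while pos != -1:
--         if pos > 0:
--             out.append(string[pos - 1])
--         if pos + m < n:
--             out.append(string[pos + m])
--         pos = string.find(word, pos + 1)
--     return ''.join(out)
-- ===== Notes on version B (the rewrite author's own statement) =====
-- stated objective: faster
-- what changed: B replaces A's per-index slice-and-compare scan (a fresh length-m slice at every position) by a repeated str.find loop that jumps from match to match using C-level substring search, collecting the neighbor chars of each found occurrence.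
-- outside the precondition, e.g. on word_ends('ab', ''): A returns 'aab', B returns 'aabb'
import Mathlib
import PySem

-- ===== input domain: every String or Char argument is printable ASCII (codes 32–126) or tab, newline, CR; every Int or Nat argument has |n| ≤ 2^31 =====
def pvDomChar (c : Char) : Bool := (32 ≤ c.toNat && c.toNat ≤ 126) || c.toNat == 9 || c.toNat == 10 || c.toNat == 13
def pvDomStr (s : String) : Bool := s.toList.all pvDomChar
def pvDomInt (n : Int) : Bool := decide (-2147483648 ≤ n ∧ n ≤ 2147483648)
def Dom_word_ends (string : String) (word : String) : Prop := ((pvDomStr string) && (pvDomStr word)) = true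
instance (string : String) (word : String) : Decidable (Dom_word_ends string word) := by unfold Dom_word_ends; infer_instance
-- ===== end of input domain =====

-- B replaces A's slice-and-compare at every index by a repeated str.find loop
-- that jumps from match to match (objective: faster on strings with few matches).

-- ===== PORT A =====
-- A's inner helper get_char_at_index: string[i] if 0 <= i <= len(string)-1 else ''
def weGetCharAt (s : List Char) (i : Int) : List Char :=
  if 0 ≤ i ∧ i ≤ (s.length : Int) - 1 then ((PySem.List.pyGet? s i).map (fun c => [c])).getD [] else []

def word_ends (string : String) (word : String) : String :=
  let s := string.toList
  let wl : Int := (PySem.Chars.len word.toList : Int)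
  let pieces := ((PySem.List.enumerate s 0).filter
      (fun p => PySem.List.slice s (some p.1) (some (p.1 + wl)) == word.toList)).map
      (fun p => weGetCharAt s (p.1 - 1) ++ weGetCharAt s (p.1 + wl))
  String.ofList (PySem.Chars.join [] pieces)

-- ===== PORT B =====
-- two facts about str.find(word, pos+1), cited by weLoop's termination proof
theorem weFindFrom_oob (s w : List Char) (k : Int) (h : (s.length : Int) < k) :
    PySem.Chars.findFrom s w k none = -1 := by
  simp only [PySem.Chars.findFrom]
  split_ifs <;> first | rfl | omega

theorem weNext_bounds (s w : List Char) (pos : Nat)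
    (h : PySem.Chars.findFrom s w ((pos : Int) + 1) none ≠ -1) :
    pos < (PySem.Chars.findFrom s w ((pos : Int) + 1) none).toNat ∧
    (PySem.Chars.findFrom s w ((pos : Int) + 1) none).toNat ≤ s.length := by
  have hk : pos + 1 ≤ s.length := by
    by_contra hc
    exact h (weFindFrom_oob s w _ (by omega))
  have hcast : ((pos : Int) + 1) = ((pos + 1 : Nat) : Int) := by push_cast; ring
  rw [hcast] at h ⊢
  have hspec := (PySem.Chars.findFrom_natCast_spec s w (pos + 1) hk h).1
  have hle : PySem.Chars.findFrom s w ((pos + 1 : Nat) : Int) none ≤ (s.length : Int) := by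
    rw [PySem.Chars.findFrom_natCast s w (pos + 1) hk]
    split
    · omega
    · have := PySem.Chars.find_le_length (s.drop (pos + 1)) w
      simp only [List.length_drop] at this
      omega
  omega

-- B's while loop, entered at a found match position pos: emit the neighbor
-- chars of pos (in-range plain indexing string[..], via pyGet?), then move on
-- to the next occurrence found by string.find(word, pos+1)
def weLoop (s w : List Char) (pos : Nat) : List Char :=
  (if 0 < pos then ((PySem.List.pyGet? s ((pos : Int) - 1)).map (fun c => [c])).getD [] else []) ++
  ((if (pos : Int) + (w.length : Int) < (s.length : Int) then ((PySem.List.pyGet? s ((pos : Int) + (w.length : Int))).map (fun c => [c])).getD [] else []) ++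
   (if h : PySem.Chars.findFrom s w ((pos : Int) + 1) none = -1 then []
    else weLoop s w (PySem.Chars.findFrom s w ((pos : Int) + 1) none).toNat))
termination_by s.length + 1 - pos
decreasing_by
  have := weNext_bounds s w pos h
  omega

def word_ends_alt (string : String) (word : String) : String :=
  let s := string.toList
  let w := word.toList
  let pos := PySem.Chars.find s w
  String.ofList (if pos = -1 then [] else weLoop s w pos.toNat)

-- ===== PRECONDITION & SPEC =====
-- Pre_ excludes only the empty word (the docstring demands a non-empty word):
-- there A's enumerate scan sees matches at positions 0..len-1 while the natural
-- find loop also sees the empty match at position len, a defensible corner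
-- neither behaviour of which anyone would specify.
def Pre_word_ends (string : String) (word : String) : Prop := word ≠ ""
instance (string : String) (word : String) : Decidable (Pre_word_ends string word) := by unfold Pre_word_ends; infer_instance
def pvWitness_word_ends : String × String := ("abcab", "b")
def Spec_word_ends (string : String) (word : String) (out : String) : Prop := out = word_ends_alt string word
instance (string : String) (word : String) (out : String) : Decidable (Spec_word_ends string word out) := by unfold Spec_word_ends; infer_instance

-- ===== CLAIM (what is proved, stated in full; the proofs are below) =====
def Claim_equal_word_ends : Prop := ∀ (string : String) (word : String), Dom_word_ends string word → Pre_word_ends string word → Spec_word_ends string word (word_ends string word)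

-- ===== LEMMAS AND PROOFS =====

-- the neighbor chars emitted for a match at position i (the common value the
-- two sides produce per match; proof-side only)
def weEmit (s w : List Char) (i : Nat) : List Char :=
  (if 0 < i then ((PySem.List.pyGet? s ((i : Int) - 1)).map (fun c => [c])).getD [] else []) ++
  (if (i : Int) + (w.length : Int) < (s.length : Int) then ((PySem.List.pyGet? s ((i : Int) + (w.length : Int))).map (fun c => [c])).getD [] else [])

-- the chars emitted for all match positions ≥ k, in increasing order
def wePieces (s w : List Char) (k : Nat) : List Char :=
  ((List.range s.length).filter (fun i => decide (k ≤ i) && decide (w <+: s.drop i))).flatMap (weEmit s w)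

theorem weJoinNil (ps : List (List Char)) : PySem.Chars.join [] ps = ps.flatten := by
  induction ps with
  | nil => rfl
  | cons a t ih =>
    cases t with
    | nil => simp [PySem.Chars.join, List.intercalate]
    | cons b t2 =>
      simp only [PySem.Chars.join, List.intercalate, List.intersperse] at *
      simp [ih]

theorem wePrefixLt (s w : List Char) (j : Nat) (h : w <+: s.drop j) (hw : w ≠ []) : j < s.length := by
  by_contra hc
  rw [List.drop_eq_nil_of_le (by omega)] at h
  exact hw (List.prefix_nil.mp h)

theorem weInfixDrop (s w : List Char) (k j : Nat) (hk : k ≤ j) (h : w <+: s.drop j) : w <:+: s.drop k := by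
  have hd : s.drop j = (s.drop k).drop (j - k) := by rw [List.drop_drop]; congr 1; omega
  rw [hd] at h
  exact h.isInfix.trans (List.drop_suffix _ _).isInfix

theorem weNoMatch (s w : List Char) (k : Nat)
    (h : ∀ i, k ≤ i → i < s.length → ¬ w <+: s.drop i) : wePieces s w k = [] := by
  unfold wePieces
  rw [List.filter_eq_nil_iff.mpr]
  · rfl
  · intro i hi
    simp only [List.mem_range] at hi
    by_cases hk : k ≤ i
    · simp [hk, h i hk hi]
    · simp [hk]

theorem weSplit (s w : List Char) (k j : Nat) (hj : j < s.length) (hPj : w <+: s.drop j)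
    (hkj : k ≤ j) (hno : ∀ i, k ≤ i → i < j → ¬ w <+: s.drop i) :
    wePieces s w k = weEmit s w j ++ wePieces s w (j + 1) := by
  unfold wePieces
  have hrange : List.range s.length = List.range' 0 j ++ List.range' j (s.length - j) := by
    rw [List.range_eq_range']
    have : List.range' 0 j 1 ++ List.range' (0 + 1 * j) (s.length - j) 1 = List.range' 0 (j + (s.length - j)) 1 :=
      List.range'_append
    simp only [Nat.zero_add, Nat.one_mul] at this
    have h2 : s.length = j + (s.length - j) := by omega
    conv_lhs => rw [h2]
    rw [← this]
  have hsucc : List.range' j (s.length - j) = j :: List.range' (j + 1) (s.length - j - 1) := by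
    have h3 : s.length - j = (s.length - j - 1) + 1 := by omega
    conv_lhs => rw [h3]
    rw [List.range'_succ]
  have hnil1 : (List.range' 0 j).filter (fun i => decide (k ≤ i) && decide (w <+: s.drop i)) = [] := by
    rw [List.filter_eq_nil_iff]
    intro i hi
    have : i < j := by have := List.mem_range'_1.mp hi; omega
    by_cases hki : k ≤ i
    · simp [hki, hno i hki this]
    · simp [hki]
  have hnil2 : (List.range' 0 j).filter (fun i => decide (j + 1 ≤ i) && decide (w <+: s.drop i)) = [] := by
    rw [List.filter_eq_nil_iff]
    intro i hi
    have : i < j := by have := List.mem_range'_1.mp hi; omega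
    simp [show ¬ (j + 1 ≤ i) by omega]
  have htail : (List.range' (j + 1) (s.length - j - 1)).filter (fun i => decide (k ≤ i) && decide (w <+: s.drop i)) =
      (List.range' (j + 1) (s.length - j - 1)).filter (fun i => decide (j + 1 ≤ i) && decide (w <+: s.drop i)) := by
    apply List.filter_congr
    intro i hi
    have := List.mem_range'_1.mp hi
    simp [show k ≤ i by omega, show j + 1 ≤ i by omega]
  rw [hrange, hsucc, List.filter_append, List.filter_append, hnil1, hnil2, List.nil_append, List.nil_append,
      List.filter_cons, List.filter_cons]
  rw [if_pos (by simp [hkj, hPj]), if_neg (by simp)]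
  rw [htail, List.flatMap_cons]

-- B's find chain from start position k emits exactly the pieces for matches ≥ k
theorem weChain (s w : List Char) (hw : w ≠ []) : ∀ n k, s.length + 1 - k ≤ n → k ≤ s.length + 1 →
    (if _h : PySem.Chars.findFrom s w (k : Int) none = -1 then []
     else weLoop s w (PySem.Chars.findFrom s w (k : Int) none).toNat) = wePieces s w k := by
  intro n
  induction n with
  | zero =>
    intro k h1 h2
    have hk : k = s.length + 1 := by omega
    rw [dif_pos (weFindFrom_oob s w _ (by omega))]
    exact (weNoMatch s w k (fun i hki hi _ => by omega)).symm
  | succ n ih =>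
    intro k h1 h2
    by_cases hk : k ≤ s.length
    · by_cases hf : PySem.Chars.findFrom s w (k : Int) none = -1
      · rw [dif_pos hf]
        symm
        apply weNoMatch
        intro i hki hi hpre
        exact (PySem.Chars.findFrom_natCast_eq_neg_one_iff s w k hk).mp hf (weInfixDrop s w k i hki hpre)
      · rw [dif_neg hf]
        obtain ⟨hge, hpref, hmin⟩ := PySem.Chars.findFrom_natCast_spec s w k hk hf
        set j := PySem.Chars.findFrom s w (k : Int) none with hjdef
        have hjlt : j.toNat < s.length := wePrefixLt s w j.toNat hpref hw
        rw [weSplit s w k j.toNat hjlt hpref (by omega)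
            (fun i hki hij => hmin i hki hij)]
        rw [weLoop]
        have hc : ((j.toNat : Int) + 1) = ((j.toNat + 1 : Nat) : Int) := by push_cast; ring
        rw [hc]
        simp only [weEmit, List.append_assoc]
        congr 1
        congr 1
        exact ih (j.toNat + 1) (by omega) (by omega)
    · have hk1 : k = s.length + 1 := by omega
      rw [dif_pos (weFindFrom_oob s w _ (by omega))]
      exact (weNoMatch s w k (fun i hki hi _ => by omega)).symm

-- A-side: enumerate over the string is a range of indices (p.2 is unused by A)
theorem weEnum (Q : Int → Bool) (F : Int → List Char) :
    ∀ (t : List Char) (k : Nat),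
    ((PySem.List.enumerate t (k : Int)).filter (fun p => Q p.1)).map (fun p => F p.1) =
    (((List.range' k t.length).filter (fun i : Nat => Q (i : Int))).map (fun i : Nat => F (i : Int)) : List (List Char)) := by
  intro t
  induction t with
  | nil => intro k; simp [PySem.List.enumerate_nil]
  | cons a t ih =>
    intro k
    rw [PySem.List.enumerate_cons, List.length_cons, List.range'_succ]
    have hc : ((k : Int) + 1) = ((k + 1 : Nat) : Int) := by push_cast; ring
    rw [List.filter_cons, List.filter_cons]
    by_cases hq : Q (k : Int)
    · simp only [hq, if_pos, List.map_cons, hc, ih (k + 1)]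
    · simp only [hq, Bool.false_eq_true, if_false]
      rw [hc]
      exact ih (k + 1)

theorem weFilterFlatMap {α β : Type} (Q : α → Bool) (F : α → List β) (l : List α) :
    (l.filter Q).flatMap F = l.flatMap (fun x => if Q x then F x else []) := by
  induction l with
  | nil => rfl
  | cons a t ih => by_cases h : Q a <;> simp [h, ih]

-- A's slice test at index i is exactly "word is a prefix of s.drop i"
theorem weQA (s w : List Char) (i : Nat) :
    (PySem.List.slice s (some (i : Int)) (some ((i : Int) + (w.length : Int))) == w) =
    decide (w <+: s.drop i) := by
  rw [PySem.List.slice_natCast_add]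
  have h : ((s.drop i).take w.length = w) ↔ (w <+: s.drop i) := by
    rw [List.prefix_iff_eq_take]
    constructor
    · intro h; exact h.symm
    · intro h; exact h.symm
  rw [Bool.eq_iff_iff]
  simp [h]

-- A's two boundary-guarded lookups at an in-range index i are weEmit
theorem weFA (s w : List Char) (i : Nat) (hi : i < s.length) :
    weGetCharAt s ((i : Int) - 1) ++ weGetCharAt s ((i : Int) + (w.length : Int)) = weEmit s w i := by
  unfold weGetCharAt weEmit
  congr 1
  · by_cases h : 0 < i
    · rw [if_pos ⟨by omega, by omega⟩, if_pos h]
    · rw [if_neg (by omega), if_neg h]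
  · by_cases h : (i : Int) + (w.length : Int) < (s.length : Int)
    · rw [if_pos ⟨by omega, by omega⟩, if_pos h]
    · rw [if_neg (by omega), if_neg h]

theorem weA_eq (s w : List Char) :
    (((PySem.List.enumerate s 0).filter
        (fun p => PySem.List.slice s (some p.1) (some (p.1 + (w.length : Int))) == w)).map
        (fun p => weGetCharAt s (p.1 - 1) ++ weGetCharAt s (p.1 + (w.length : Int)))).flatten
      = wePieces s w 0 := by
  show (((PySem.List.enumerate s ((0 : Nat) : Int)).filter
        (fun p => PySem.List.slice s (some p.1) (some (p.1 + (w.length : Int))) == w)).map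
        (fun p => weGetCharAt s (p.1 - 1) ++ weGetCharAt s (p.1 + (w.length : Int)))).flatten
      = wePieces s w 0
  rw [weEnum (fun x => PySem.List.slice s (some x) (some (x + (w.length : Int))) == w)
      (fun x => weGetCharAt s (x - 1) ++ weGetCharAt s (x + (w.length : Int))) s 0]
  rw [← List.range_eq_range', ← List.flatMap_def, weFilterFlatMap]
  unfold wePieces
  rw [weFilterFlatMap, List.flatMap_def, List.flatMap_def]
  apply congrArg List.flatten
  apply List.map_congr_left
  intro i hi
  have hi' : i < s.length := List.mem_range.mp hi
  rw [weQA s w i]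
  by_cases hp : w <+: s.drop i
  · simp only [hp, decide_true, Nat.zero_le, Bool.and_true, if_pos]
    exact weFA s w i hi'
  · simp [hp]

-- ===== VERDICT (by name: the statement is the Claim_ definition above) =====
theorem word_ends_spec : Claim_equal_word_ends := by
  intro string word _ hpre
  unfold Spec_word_ends word_ends word_ends_alt
  have hw : word.toList ≠ [] := fun h => hpre (String.toList_eq_nil_iff.mp h)
  simp only [PySem.Chars.len_eq]
  apply congrArg String.ofList
  rw [weJoinNil, weA_eq string.toList word.toList]
  have hchain := weChain string.toList word.toList hw (string.toList.length + 1) 0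
      (by omega) (by omega)
  rw [show ((0 : Nat) : Int) = (0 : Int) from rfl] at hchain
  rw [PySem.Chars.findFrom_zero] at hchain
  rw [← hchain, dite_eq_ite]
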